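-- pv_equiv track=rewrite | github.com/CClairvoyant/iti0102-2022 | EX/ex05_hobbies/hobbies.py | create_dictionary_with_hobbies
-- ===== SOURCE A (Python) =====
-- def create_dictionary_with_hobbies(data: str) -> dict:
--     """
--     Create dictionary about hobbies and their hobbyists ie. {hobby1: [name1, name2, ...], hobby2: [...]}.
--     :param data: given string from database
--     :return: dictionary, where keys are hobbies and values are lists of people. Values are sorted alphabetically
--     """
--     data_list = data.split("\n")
--     people_hobbies = {}
--     for person in data_list:
--         if person.split(":")[1] not in people_hobbies:
--             people_hobbies[person.split(":")[1]] = [person.split(":")[0]]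
--         else:
--             people_hobbies.get(person.split(":")[1]).append(person.split(":")[0])
--     for hobbies in people_hobbies.keys():
--         people_hobbies[hobbies] = list(set(people_hobbies.get(hobbies)))
--     for key in people_hobbies:
--         people_hobbies[key] = sorted(people_hobbies.get(key))
--     return people_hobbies
-- ===== SOURCE B (Python) =====
-- def create_dictionary_with_hobbies(data: str) -> dict:
--     """Flat (hobby, name) pair list; dedup hobbies in first-seen order; one filtered scan per hobby."""
--     pairs = [(line.split(":")[1], line.split(":")[0]) for line in data.split("\n")]
--     hobbies = dict.fromkeys(h for h, _ in pairs)
--     return {h: sorted({n for h2, n in pairs if h2 == h}) for h in hobbies}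
-- ===== Notes on version B (the rewrite author's own statement) =====
-- stated objective: alternative
-- what changed: B maintains no dict while grouping: it flattens the input into a (hobby, name) pair list, deduplicates the hobby keys once with dict.fromkeys, and builds each value by an independent filtered scan over the pair list (sorted set comprehension per hobby), replacing A's incremental hash-grouping with membership if/else plus two later rewrite passes.
import Mathlib
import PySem

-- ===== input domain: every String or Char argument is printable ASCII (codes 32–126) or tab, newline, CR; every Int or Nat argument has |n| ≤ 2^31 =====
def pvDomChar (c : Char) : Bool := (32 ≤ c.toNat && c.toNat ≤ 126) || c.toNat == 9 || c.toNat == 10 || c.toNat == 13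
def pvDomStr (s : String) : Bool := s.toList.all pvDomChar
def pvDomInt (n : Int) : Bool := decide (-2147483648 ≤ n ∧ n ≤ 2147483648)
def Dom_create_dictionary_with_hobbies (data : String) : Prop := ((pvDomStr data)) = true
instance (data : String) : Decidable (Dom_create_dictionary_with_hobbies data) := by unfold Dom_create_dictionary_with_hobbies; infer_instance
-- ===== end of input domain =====

-- B keeps no dict while grouping: it flattens input into (hobby, name) pairs, dedups the hobby
-- keys once, and builds each value by an independent filtered scan; objective: alternative.

-- shared helpers: person.split(":")[1] and person.split(":")[0] (total forms; Pre_ keeps us where the index exists)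
def pvHobby (person : String) : String :=
  (PySem.List.pyGet? ((PySem.Str.split? person ":").getD []) 1).getD ""
def pvName (person : String) : String :=
  (PySem.List.pyGet? ((PySem.Str.split? person ":").getD []) 0).getD ""

-- ===== PORT A =====
def create_dictionary_with_hobbies (data : String) : List (String × List String) :=
  let data_list := (PySem.Str.split? data "\n").getD []
  let people_hobbies : PySem.Dict String (List String) :=
    data_list.foldl (fun d person =>
      if d.contains (pvHobby person) = false then
        d.insert (pvHobby person) [pvName person]
      else
        d.modify (pvHobby person) [] (fun l => l ++ [pvName person])) PySem.Dict.empty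
  let d2 := people_hobbies.keys.foldl
    (fun d hobbies => d.insert hobbies (PySem.Set.ofList (d.getD hobbies []))) people_hobbies
  let d3 := d2.keys.foldl
    (fun d key => d.insert key (PySem.List.sorted (d.getD key []) (fun x => x) false)) d2
  d3.items

-- ===== PORT B =====
def create_dictionary_with_hobbies_alt (data : String) : List (String × List String) :=
  let pairs := ((PySem.Str.split? data "\n").getD []).map (fun line => (pvHobby line, pvName line))
  let hobbies := PySem.Set.ofList (pairs.map Prod.fst)
  hobbies.map (fun h =>
    (h, PySem.List.sorted (PySem.Set.ofList ((pairs.filter (fun q => q.1 == h)).map Prod.snd))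
          (fun x => x) false))

-- ===== PRECONDITION & SPEC =====
-- Pre_ excludes exactly the inputs where A raises IndexError: a line of data containing no colon
-- separator, so that the second split field does not exist (B raises there too).
def Pre_create_dictionary_with_hobbies (data : String) : Prop :=
  ((PySem.Str.split? data "\n").getD []).all (fun l => PySem.Str.isIn ":" l) = true
instance (data : String) : Decidable (Pre_create_dictionary_with_hobbies data) := by
  unfold Pre_create_dictionary_with_hobbies; infer_instance
def pvWitness_create_dictionary_with_hobbies : String := "ann:piano\nbob:chess\nann:piano"

def Spec_create_dictionary_with_hobbies (data : String) (out : List (String × List String)) : Prop :=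
  out = create_dictionary_with_hobbies_alt data
instance (data : String) (out : List (String × List String)) : Decidable (Spec_create_dictionary_with_hobbies data out) := by
  unfold Spec_create_dictionary_with_hobbies; infer_instance

-- ===== CLAIM (what is proved, stated in full; the proofs are below) =====
def Claim_equal_create_dictionary_with_hobbies : Prop := ∀ (data : String), Dom_create_dictionary_with_hobbies data → Pre_create_dictionary_with_hobbies data → Spec_create_dictionary_with_hobbies data (create_dictionary_with_hobbies data)

-- ===== LEMMAS AND PROOFS =====

-- A's grouping loop, characterised: starting from d, the keys become Set.update d.keys (hobbies)
-- and each value is d's value extended by the names of the matching lines, in order.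
lemma pvA_loop (lines : List String) :
    ∀ (d : PySem.Dict String (List String)),
    (lines.foldl (fun d person =>
        if d.contains (pvHobby person) = false then d.insert (pvHobby person) [pvName person]
        else d.modify (pvHobby person) [] (fun l => l ++ [pvName person])) d).keys
      = PySem.Set.update d.keys (lines.map pvHobby)
    ∧ ∀ k, (lines.foldl (fun d person =>
        if d.contains (pvHobby person) = false then d.insert (pvHobby person) [pvName person]
        else d.modify (pvHobby person) [] (fun l => l ++ [pvName person])) d).getD k []
      = d.getD k [] ++ (lines.filter (fun p => pvHobby p == k)).map pvName := by
  induction lines with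
  | nil => intro d; simp [PySem.Set.update]
  | cons p lines ih =>
    intro d
    simp only [List.foldl_cons, List.map_cons, List.filter_cons]
    by_cases hc : d.contains (pvHobby p) = false
    · rw [hc]; simp only [if_true]
      obtain ⟨ihk, ihv⟩ := ih (d.insert (pvHobby p) [pvName p])
      have hnotmem : pvHobby p ∉ d.keys := by
        rw [PySem.Dict.contains_eq_decide_mem_keys] at hc; simpa using hc
      constructor
      · rw [ihk, PySem.Dict.keys_insert_of_not_contains _ _ hc]
        simp only [PySem.Set.update, List.foldl_cons]
        congr 1
        simp [PySem.Set.add, PySem.Set.contains, hnotmem]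
      · intro k
        rw [ihv k, PySem.Dict.getD_insert]
        by_cases hk : k = pvHobby p
        · subst hk
          rw [if_pos rfl, PySem.Dict.getD_of_not_contains _ _ hc]
          simp
        · rw [if_neg hk]
          have : (pvHobby p == k) = false := by
            simpa using fun h => hk h.symm
          simp [this]
    · have hc1 : d.contains (pvHobby p) = true := by
        cases h : d.contains (pvHobby p) <;> simp_all
      rw [hc1]; simp only [Bool.true_eq_false, if_false]
      obtain ⟨ihk, ihv⟩ := ih (d.modify (pvHobby p) [] (fun l => l ++ [pvName p]))
      have hmem : pvHobby p ∈ d.keys := by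
        rw [PySem.Dict.contains_eq_decide_mem_keys] at hc1; simpa using hc1
      constructor
      · rw [ihk, PySem.Dict.keys_modify]
        simp only [PySem.Set.update, List.foldl_cons]
        congr 1
        rw [PySem.Dict.keys_insert_of_contains _ _ hc1]
        simp [PySem.Set.add, PySem.Set.contains, hmem]
      · intro k
        rw [ihv k, PySem.Dict.getD_modify]
        by_cases hk : k = pvHobby p
        · subst hk; simp
        · rw [if_neg hk]
          have : (pvHobby p == k) = false := by
            simpa using fun h => hk h.symm
          simp [this]

-- folding 'd[k] = g(d[k])' over a nodup key list: pointwise effect on getD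
lemma pv_foldl_insert_getD {ν : Type} (g : ν → ν) (dflt : ν) (ks : List String) :
    ∀ (d : PySem.Dict String ν), ks.Nodup →
    ∀ c, (ks.foldl (fun d k => d.insert k (g (d.getD k dflt))) d).getD c dflt
         = if c ∈ ks then g (d.getD c dflt) else d.getD c dflt := by
  induction ks with
  | nil => intro d _ c; simp
  | cons k ks ih =>
    intro d hnd c
    simp only [List.foldl_cons]
    rw [ih _ (List.nodup_cons.mp hnd).2 c]
    rcases List.nodup_cons.mp hnd with ⟨hknotin, _⟩
    by_cases hc : c ∈ ks
    · have hne : c ≠ k := fun h => hknotin (h ▸ hc)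
      simp [hc, hne, PySem.Dict.getD_insert, List.mem_cons]
    · by_cases hck : c = k
      · subst hck; simp [hc]
      · simp [hc, hck, PySem.Dict.getD_insert]

lemma pv_set_update_self_generic (s : PySem.Set String) (xs : List String) (h : ∀ x ∈ xs, x ∈ s) :
    PySem.Set.update s xs = s := by
  induction xs generalizing s with
  | nil => simp [PySem.Set.update]
  | cons x xs ih =>
    simp only [PySem.Set.update, List.foldl_cons]
    rw [PySem.Set.add_of_mem (h x (by simp))]
    exact ih s (fun y hy => h y (by simp [hy]))

-- keys of the value-rewriting fold are unchanged
lemma pv_foldl_insert_keys {ν : Type} (g : ν → ν) (dflt : ν) (d : PySem.Dict String ν) :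
    (d.keys.foldl (fun d k => d.insert k (g (d.getD k dflt))) d).keys = d.keys := by
  rw [PySem.Dict.keys_foldl_insert]
  exact pv_set_update_self_generic d.keys d.keys (fun x hx => hx)

-- ===== VERDICT (by name: the statement is the Claim_ definition above) =====
theorem create_dictionary_with_hobbies_spec : Claim_equal_create_dictionary_with_hobbies := by
  intro data _ _
  unfold Spec_create_dictionary_with_hobbies
  simp only [create_dictionary_with_hobbies, create_dictionary_with_hobbies_alt]
  set lines := (PySem.Str.split? data "\n").getD [] with hlines
  obtain ⟨hk, hv⟩ := pvA_loop lines PySem.Dict.empty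
  set dA := lines.foldl (fun d person =>
      if d.contains (pvHobby person) = false then d.insert (pvHobby person) [pvName person]
      else d.modify (pvHobby person) [] fun l => l ++ [pvName person]) PySem.Dict.empty with hdA
  have hkeys : dA.keys = PySem.Set.ofList (lines.map pvHobby) := by
    rw [hk]; simp [PySem.Dict.keys_empty, PySem.Set.ofList_eq_foldl, PySem.Set.update]
  have hnd : dA.keys.Nodup := by rw [hkeys]; exact PySem.Set.nodup_ofList _
  set dA2 := dA.keys.foldl (fun d hobbies =>
      d.insert hobbies (PySem.Set.ofList (d.getD hobbies []))) dA with hdA2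
  set dA3 := dA2.keys.foldl (fun d key =>
      d.insert key (PySem.List.sorted (d.getD key []) (fun x => x) false)) dA2 with hdA3
  have hkeys2 : dA2.keys = dA.keys := pv_foldl_insert_keys (fun v => PySem.Set.ofList v) [] dA
  have hnd2 : dA2.keys.Nodup := by rw [hkeys2]; exact hnd
  have hkeys3 : dA3.keys = dA2.keys :=
    pv_foldl_insert_keys (fun v => PySem.List.sorted v (fun x => x) false) [] dA2
  have hnd3 : dA3.keys.Nodup := by rw [hkeys3]; exact hnd2
  have hgetD2 : ∀ c, dA2.getD c [] =
      if c ∈ dA.keys then PySem.Set.ofList (dA.getD c []) else dA.getD c [] :=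
    pv_foldl_insert_getD (fun v => PySem.Set.ofList v) [] dA.keys dA hnd
  have hgetD3 : ∀ c, dA3.getD c [] =
      if c ∈ dA2.keys then PySem.List.sorted (dA2.getD c []) (fun x => x) false else dA2.getD c [] :=
    pv_foldl_insert_getD (fun v => PySem.List.sorted v (fun x => x) false) [] dA2.keys dA2 hnd2
  rw [PySem.Dict.items_eq_map_keys dA3 hnd3 [], hkeys3, hkeys2, hkeys]
  have hpairs : (lines.map (fun line => (pvHobby line, pvName line))).map Prod.fst
      = lines.map pvHobby := by simp [List.map_map]
  rw [hpairs]
  apply List.map_congr_left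
  intro k hkmem
  have hkmem' : k ∈ dA.keys := by rw [hkeys]; exact hkmem
  have h3 := hgetD3 k
  rw [hkeys2, if_pos hkmem'] at h3
  have h2 := hgetD2 k
  rw [if_pos hkmem'] at h2
  have hfilter : ((lines.map (fun line => (pvHobby line, pvName line))).filter
      (fun q => q.1 == k)).map Prod.snd
      = (lines.filter (fun p => pvHobby p == k)).map pvName := by
    rw [List.filter_map]
    simp [Function.comp_def]
  rw [h3, h2, hv k, hfilter]
  simp [PySem.Dict.getD_empty]
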